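-- pv_equiv track=rewrite | github.com/MaksKukarach/bioinformatics | replication.py | FasterSymbolMap
-- ===== SOURCE A (Python) =====
-- def FasterSymbolMap(Genome, symbol):
--     mapping = {}
--
--     # 1.Extend the genome to account for circularity
--     ExtendedGenome = Genome + Genome[:len(Genome)//2]
--     # 2.Create first window count
--     len_window = len(Genome)//2
--     mapping[0] = PatternCount(ExtendedGenome[:len_window], symbol)
--     # 3.Slide and update last and next symbols
--     for i in range(1, len(Genome)):
--         count = mapping[i-1]
--         if ExtendedGenome[i-1] == symbol:
--             count -= 1
--         if ExtendedGenome[i+len_window-1] == symbol: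
--             count += 1
--         mapping[i] = count
--
--     return mapping
--
-- def PatternCount(Text, Pattern):
--     count = 0
--     for i in range(len(Text)-len(Pattern)+1):
--         if Text[i:i+len(Pattern)] == Pattern:
--             count = count+1
--     return count
-- ===== SOURCE B (Python) =====
-- def PatternCount(Text, Pattern):
--     count = 0
--     for i in range(len(Text)-len(Pattern)+1):
--         if Text[i:i+len(Pattern)] == Pattern:
--             count = count+1
--     return count
--
-- def FasterSymbolMap(Genome, symbol):
--     n = len(Genome)
--     half = n // 2
--     ext = Genome + Genome[:half]
--     # anchor: the first window's count, as PatternCount computes it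
--     base = PatternCount(ext[:half], symbol)
--     # prefix table: P[j] = number of positions k < j with ext[k] == symbol
--     P = [0]
--     s = 0
--     for ch in ext:
--         if ch == symbol:
--             s += 1
--         P.append(s)
--     mapping = {0: base}
--     for i in range(1, n):
--         mapping[i] = base + P[i + half] - P[half] - P[i]
--     return mapping
-- ===== Notes on version B (the rewrite author's own statement) =====
-- stated objective: alternative
-- what changed: Replaces A's incremental sliding-window accumulator (each count derived from the previous by subtracting/adding edge symbols) with a prefix-sum table of symbol occurrences and a closed-form per-index expression mapping[i] = base + P[i+half] - P[half] - P[i] anchored at PatternCount for index 0.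
import Mathlib
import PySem

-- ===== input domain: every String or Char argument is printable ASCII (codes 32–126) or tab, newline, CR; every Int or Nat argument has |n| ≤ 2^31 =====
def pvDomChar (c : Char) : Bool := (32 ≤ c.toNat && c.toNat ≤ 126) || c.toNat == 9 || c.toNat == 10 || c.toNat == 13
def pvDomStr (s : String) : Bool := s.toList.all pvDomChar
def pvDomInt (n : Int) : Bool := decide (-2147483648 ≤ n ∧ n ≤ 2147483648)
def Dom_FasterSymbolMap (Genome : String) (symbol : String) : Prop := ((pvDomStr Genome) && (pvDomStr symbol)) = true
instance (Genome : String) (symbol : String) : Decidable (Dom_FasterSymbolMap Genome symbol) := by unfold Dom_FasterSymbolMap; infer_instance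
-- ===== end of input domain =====

-- B replaces A's incremental sliding-window accumulator with a prefix-sum table and a
-- closed-form per-index expression (alternative decomposition, same O(n) cost).


-- ===== PORT A =====
-- helper PatternCount of Source A (Text, Pattern as lists of chars)
def PatternCountA (Text : List Char) (Pattern : List Char) : Int :=
  (PySem.List.pyRange 0 ((Text.length : Int) - (Pattern.length : Int) + 1) 1).foldl
    (fun count i =>
      if PySem.List.slice Text (some i) (some (i + (Pattern.length : Int))) = Pattern then count + 1
      else count) 0

-- ExtendedGenome[j] == symbol : Python compares a one-character string with symbol;
-- none is unreachable (the indices A uses are always in range; Python would raise IndexError)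
def optHitA (o : Option Char) (symbol : String) : Bool :=
  match o with
  | some c => String.mk [c] == symbol
  | none => false

def FasterSymbolMap (Genome : String) (symbol : String) : List (Int × Int) :=
  let g := Genome.toList
  let n : Int := (g.length : Int)
  let extended := g ++ PySem.List.slice g none (some (PySem.Int.floordiv n 2))
  let lenWindow := PySem.Int.floordiv n 2
  let m : PySem.Dict Int Int :=
    (PySem.Dict.empty).insert 0 (PatternCountA (PySem.List.slice extended none (some lenWindow)) symbol.toList)
  let m := (PySem.List.pyRange 1 n 1).foldl (fun m i =>
      let count := m.getD (i - 1) 0            -- mapping[i-1]: the key is always present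
      let count := if optHitA (PySem.List.pyGet? extended (i - 1)) symbol then count - 1 else count
      let count := if optHitA (PySem.List.pyGet? extended (i + lenWindow - 1)) symbol then count + 1 else count
      m.insert i count) m
  m.items

-- ===== PORT B =====
-- Source B's own copy of PatternCount (textually the same helper)
def PatternCountB (Text : List Char) (Pattern : List Char) : Int :=
  (PySem.List.pyRange 0 ((Text.length : Int) - (Pattern.length : Int) + 1) 1).foldl
    (fun count i =>
      if PySem.List.slice Text (some i) (some (i + (Pattern.length : Int))) = Pattern then count + 1
      else count) 0

def FasterSymbolMap_alt (Genome : String) (symbol : String) : List (Int × Int) :=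
  let g := Genome.toList
  let n : Int := (g.length : Int)
  let half := PySem.Int.floordiv n 2
  let ext := g ++ PySem.List.slice g none (some half)
  let base := PatternCountB (PySem.List.slice ext none (some half)) symbol.toList
  -- prefix table P: the loop appends the running count of ch == symbol
  let P := (ext.foldl (fun (acc : List Int × Int) ch =>
      let s := if String.mk [ch] == symbol then acc.2 + 1 else acc.2
      (acc.1 ++ [s], s)) ([0], 0)).1
  -- the dict {0: base} then mapping[i] for i = 1..n-1: fresh keys in order, so its
  -- items list is exactly this list (P indices are always in range)
  (0, base) :: (PySem.List.pyRange 1 n 1).map (fun i =>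
      (i, base + PySem.List.pyGetD P (i + half) 0 - PySem.List.pyGetD P half 0 - PySem.List.pyGetD P i 0))

-- ===== PRECONDITION & SPEC =====
def Spec_FasterSymbolMap (Genome : String) (symbol : String) (out : List (Int × Int)) : Prop := out = FasterSymbolMap_alt Genome symbol
instance (Genome : String) (symbol : String) (out : List (Int × Int)) : Decidable (Spec_FasterSymbolMap Genome symbol out) := by unfold Spec_FasterSymbolMap; infer_instance

-- ===== CLAIM (what is proved, stated in full; the proofs are below) =====
def Claim_equal_FasterSymbolMap : Prop := ∀ (Genome : String) (symbol : String), Dom_FasterSymbolMap Genome symbol → Spec_FasterSymbolMap Genome symbol (FasterSymbolMap Genome symbol)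


-- ===== LEMMAS AND PROOFS =====

-- the single-character indicator both programs slide with
def pHit (symbol : String) (c : Char) : Bool := String.mk [c] == symbol

-- number of symbol positions among the first j characters
def cntS (symbol : String) (l : List Char) : Int := (l.countP (pHit symbol) : Int)

theorem cntS_take_succ (symbol : String) (l : List Char) (j : Nat) (h : j < l.length) :
    cntS symbol (l.take (j + 1)) = cntS symbol (l.take j) + (if pHit symbol l[j] then 1 else 0) := by
  rw [List.take_succ, List.getElem?_eq_getElem h]
  rw [cntS, cntS, List.countP_append]
  simp only [Option.toList_some, List.countP_singleton]
  split_ifs <;> simp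

-- characterisation of B's prefix-table loop
theorem pfold_char (symbol : String) (l : List Char) (acc : List Int) (s : Int) :
    l.foldl (fun (acc : List Int × Int) ch =>
      let s := if String.mk [ch] == symbol then acc.2 + 1 else acc.2
      (acc.1 ++ [s], s)) (acc ++ [s], s)
    = (acc ++ (List.range (l.length + 1)).map (fun j => s + cntS symbol (l.take j)),
       s + cntS symbol l) := by
  induction l generalizing acc s with
  | nil => simp [cntS]
  | cons c l ih =>
    have hcnt : ∀ m : List Char, cntS symbol (c :: m) = cntS symbol m + (if pHit symbol c then 1 else 0) := by
      intro m; simp only [cntS, List.countP_cons, pHit]; split_ifs <;> simp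
    simp only [List.foldl_cons]
    show l.foldl _ ((acc ++ [s]) ++ [if String.mk [c] == symbol then s + 1 else s],
        (if String.mk [c] == symbol then s + 1 else s)) = _
    rw [ih]
    refine Prod.ext ?_ ?_
    · show acc ++ [s] ++ _ = acc ++ _
      rw [List.append_assoc]
      congr 1
      conv_rhs => rw [show (c :: l).length + 1 = (l.length + 1) + 1 from by simp,
        List.range_succ_eq_map, List.map_cons, List.map_map]
      rw [List.singleton_append]
      congr 1
      · simp [cntS]
      · refine List.map_congr_left ?_
        intro j _
        show (if String.mk [c] == symbol then s + 1 else s) + cntS symbol (l.take j)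
            = s + cntS symbol ((c :: l).take (j + 1))
        rw [List.take_succ_cons, hcnt]
        simp only [pHit]
        split_ifs <;> ring
    · show (if String.mk [c] == symbol then s + 1 else s) + cntS symbol l = s + cntS symbol (c :: l)
      rw [hcnt]
      simp only [pHit]
      split_ifs <;> ring

-- A's count recurrence, as a function of the index
def vA (ext : List Char) (symbol : String) (halfI : Int) (base : Int) : Nat → Int
  | 0 => base
  | (k+1) =>
    let c := vA ext symbol halfI base k
    let c := if optHitA (PySem.List.pyGet? ext (k : Int)) symbol then c - 1 else c
    if optHitA (PySem.List.pyGet? ext ((k : Int) + halfI)) symbol then c + 1 else c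

theorem vA_closed (ext : List Char) (symbol : String) (n' h' : Nat) (base : Int)
    (hlen : ext.length = n' + h') (k : Nat) (hk : k ≤ n') :
    vA ext symbol (h' : Int) base k
      = base + cntS symbol (ext.take (k + h')) - cntS symbol (ext.take h') - cntS symbol (ext.take k) := by
  induction k with
  | zero => simp [vA, cntS]
  | succ k ih =>
    have hk' : k < n' := by omega
    have h1 : k < ext.length := by omega
    have h2 : k + h' < ext.length := by omega
    have e1 : PySem.List.pyGet? ext (k : Int) = some ext[k] := by
      simp [PySem.List.pyGet?_natCast, List.getElem?_eq_getElem h1]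
    have e2 : PySem.List.pyGet? ext ((k : Int) + (h' : Int)) = some ext[k + h'] := by
      have : ((k : Int) + (h' : Int)) = ((k + h' : Nat) : Int) := by push_cast; ring
      rw [this, PySem.List.pyGet?_natCast, List.getElem?_eq_getElem h2]
    have hv := ih (by omega)
    have hs1 := cntS_take_succ symbol ext k h1
    have hs2 := cntS_take_succ symbol ext (k + h') h2
    have harg : k + 1 + h' = (k + h') + 1 := by omega
    rw [show vA ext symbol (h' : Int) base (k+1)
        = (if optHitA (PySem.List.pyGet? ext ((k : Int) + (h' : Int))) symbol then
            (if optHitA (PySem.List.pyGet? ext (k : Int)) symbol then vA ext symbol (h' : Int) base k - 1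
             else vA ext symbol (h' : Int) base k) + 1
           else (if optHitA (PySem.List.pyGet? ext (k : Int)) symbol then vA ext symbol (h' : Int) base k - 1
             else vA ext symbol (h' : Int) base k)) from rfl]
    rw [e1, e2, harg, hs2, hs1, hv]
    simp only [optHitA, pHit]
    split_ifs <;> omega


-- the value A's loop body inserts at key i (the let-chain of the fold, zeta-reduced)
def newCount (ext : List Char) (symbol : String) (halfI : Int) (m : PySem.Dict Int Int) (i : Int) : Int :=
  if optHitA (PySem.List.pyGet? ext (i + halfI - 1)) symbol then
    (if optHitA (PySem.List.pyGet? ext (i - 1)) symbol then m.getD (i - 1) 0 - 1 else m.getD (i - 1) 0) + 1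
  else
    (if optHitA (PySem.List.pyGet? ext (i - 1)) symbol then m.getD (i - 1) 0 - 1 else m.getD (i - 1) 0)

-- invariant of A's loop over range(1, 1+j): items so far, and the last value
theorem foldA_inv (ext : List Char) (symbol : String) (halfI base : Int) (j : Nat) :
    ((PySem.List.pyRange 1 (1 + (j : Int)) 1).foldl
        (fun m i => m.insert i (newCount ext symbol halfI m i))
        ((PySem.Dict.empty : PySem.Dict Int Int).insert 0 base)).items
      = (0, base) :: (List.range j).map (fun (k : Nat) => (((k : Int) + 1), vA ext symbol halfI base (k + 1)))
    ∧ ((PySem.List.pyRange 1 (1 + (j : Int)) 1).foldl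
        (fun m i => m.insert i (newCount ext symbol halfI m i))
        ((PySem.Dict.empty : PySem.Dict Int Int).insert 0 base)).getD (j : Int) 0
      = vA ext symbol halfI base j := by
  induction j with
  | zero =>
    rw [show (1 + ((0 : Nat) : Int)) = 1 by norm_num, PySem.List.pyRange_one_eq_nil (by norm_num),
      List.foldl_nil]
    constructor
    · rw [PySem.Dict.items_insert_of_not_contains _ _ (PySem.Dict.contains_empty _)]
      rfl
    · exact PySem.Dict.getD_insert_self _ _ _ _
  | succ j ih =>
    obtain ⟨hitems, hget⟩ := ih
    have hr : PySem.List.pyRange 1 (1 + ((j + 1 : Nat) : Int)) 1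
        = PySem.List.pyRange 1 (1 + (j : Int)) 1 ++ [1 + (j : Int)] := by
      rw [show (1 + ((j + 1 : Nat) : Int)) = (1 + (j : Int)) + 1 by push_cast; ring]
      exact PySem.List.pyRange_one_succ_right (by omega)
    rw [hr, List.foldl_append, List.foldl_cons, List.foldl_nil]
    set d := (PySem.List.pyRange 1 (1 + (j : Int)) 1).foldl
        (fun m i => m.insert i (newCount ext symbol halfI m i))
        ((PySem.Dict.empty : PySem.Dict Int Int).insert 0 base) with hd
    have hfresh : d.contains (1 + (j : Int)) = false := by
      rw [PySem.Dict.contains_eq_decide_mem_keys]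
      simp only [PySem.Dict.keys, hitems, List.map_cons, List.map_map,
        decide_eq_false_iff_not, List.mem_cons, List.mem_map, Function.comp,
        List.mem_range]
      rintro (h | ⟨k, hk, hke⟩)
      · omega
      · omega
    have hval : newCount ext symbol halfI d (1 + (j : Int)) = vA ext symbol halfI base (j + 1) := by
      have e1 : (1 : Int) + (j : Int) - 1 = (j : Int) := by ring
      have e2 : (1 : Int) + (j : Int) + halfI - 1 = (j : Int) + halfI := by ring
      rw [newCount, e1, e2, hget]
      rfl
    constructor
    · rw [PySem.Dict.items_insert_of_not_contains _ _ hfresh, hitems, hval, List.range_succ,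
        List.map_append, List.cons_append]
      congr 2
      simp only [List.map_cons, List.map_nil]
      congr 2
      ring
    · rw [show (((j + 1 : Nat)) : Int) = 1 + (j : Int) by push_cast; ring,
        PySem.Dict.getD_insert_self, hval]

-- B's prefix table, read at a natural index
theorem getP (symbol : String) (ext : List Char) (j : Nat) (hj : j ≤ ext.length) :
    PySem.List.pyGetD ((ext.foldl (fun (acc : List Int × Int) ch =>
        let s := if String.mk [ch] == symbol then acc.2 + 1 else acc.2
        (acc.1 ++ [s], s)) ([0], 0)).1) ((j : Nat) : Int) 0 = cntS symbol (ext.take j) := by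
  rw [show (([0], (0 : Int)) : List Int × Int) = (([] : List Int) ++ [0], 0) from rfl,
    pfold_char symbol ext [] 0]
  simp only [List.nil_append]
  rw [PySem.List.pyGetD_natCast, List.getD_eq_getElem?_getD]
  simp [Nat.lt_succ_of_le hj]

-- ===== VERDICT (by name: the statement is the Claim_ definition above) =====
theorem FasterSymbolMap_spec : Claim_equal_FasterSymbolMap := by
  intro Genome symbol _
  show FasterSymbolMap Genome symbol = FasterSymbolMap_alt Genome symbol
  simp only [FasterSymbolMap, FasterSymbolMap_alt]
  rw [show PatternCountB = PatternCountA from rfl]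
  have hdiv : PySem.Int.floordiv ((Genome.toList.length : Nat) : Int) 2
      = ((Genome.toList.length / 2 : Nat) : Int) := by
    exact_mod_cast PySem.Int.floordiv_natCast Genome.toList.length 2
  rw [hdiv]
  simp only [PySem.List.slice_to_natCast]
  set n' := Genome.toList.length with hn'
  set h' := n' / 2 with hh'
  have hh : h' ≤ n' := Nat.div_le_self _ _
  set ext := Genome.toList ++ Genome.toList.take h' with hext
  have hlen : ext.length = n' + h' := by
    rw [hext, List.length_append, List.length_take]
    omega
  set base := PatternCountA (ext.take h') symbol.toList with hbase
  rw [show (fun (m : PySem.Dict Int Int) (i : Int) =>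
      let count := m.getD (i - 1) 0
      let count := if optHitA (PySem.List.pyGet? ext (i - 1)) symbol then count - 1 else count
      let count := if optHitA (PySem.List.pyGet? ext (i + ((h' : Nat) : Int) - 1)) symbol then count + 1 else count
      m.insert i count)
    = (fun m i => m.insert i (newCount ext symbol ((h' : Nat) : Int) m i)) from rfl]
  rcases Nat.eq_zero_or_pos n' with h0 | hpos
  · rw [h0]
    rw [show (((0 : Nat)) : Int) = 0 by norm_num, PySem.List.pyRange_one_eq_nil (by norm_num)]
    simp only [List.foldl_nil, List.map_nil]
    rw [PySem.Dict.items_insert_of_not_contains _ _ (PySem.Dict.contains_empty _)]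
    rfl
  · obtain ⟨j, hj⟩ : ∃ j, n' = j + 1 := ⟨n' - 1, by omega⟩
    rw [hj, show (((j + 1 : Nat)) : Int) = 1 + (j : Int) by push_cast; ring]
    rw [(foldA_inv ext symbol ((h' : Nat) : Int) base j).1]
    rw [PySem.List.pyRange_one, show ((1 + (j : Int) - 1)).toNat = j by omega, List.map_map]
    congr 1
    refine List.map_congr_left ?_
    intro k hk
    simp only [List.mem_range] at hk
    simp only [Function.comp]
    have i1 : (1 : Int) + (k : Int) + ((h' : Nat) : Int) = (((k + 1 + h' : Nat)) : Int) := by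
      push_cast; ring
    have i3 : (1 : Int) + (k : Int) = (((k + 1 : Nat)) : Int) := by push_cast; ring
    rw [i1, i3, getP symbol ext (k + 1 + h') (by omega), getP symbol ext h' (by omega),
      getP symbol ext (k + 1) (by omega),
      vA_closed ext symbol n' h' base (by omega) (k + 1) (by omega)]
    refine Prod.ext ?_ rfl
    show ((k : Int) + 1) = (((k + 1 : Nat)) : Int)
    push_cast
    ring
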